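-- pv_equiv track=rewrite | github.com/jmiller9930/blackbox | renaissance_v4/game_theory/memory_bundle.py | categorize_applied_bundle_keys
-- ===== SOURCE A (Python) =====
-- BUNDLE_APPLY_WHITELIST: frozenset[str] = frozenset(
--     {
--         # Execution geometry (ExecutionManager)
--         "atr_stop_mult",
--         "atr_target_mult",
--         # Fusion (``fuse_signal_results`` manifest overrides)
--         "fusion_min_score",
--         "fusion_max_conflict_score",
--         "fusion_overlap_penalty_per_extra_signal",
--         # Signal thresholds (``configure_from_manifest`` on each signal class)
--         "mean_reversion_fade_min_confidence",
--         "mean_reversion_fade_stretch_threshold",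
--         "trend_continuation_min_confidence",
--         "trend_continuation_min_regime_fit",
--         "pullback_continuation_min_confidence",
--         "pullback_continuation_volatility_threshold",
--         "breakout_expansion_min_confidence",
--         # Policy: disable catalog signal modules for this run
--         "disabled_signal_modules",
--     }
-- )
--
-- def categorize_applied_bundle_keys(keys: list[str]) -> dict[str, list[str]]:
--     """Split applied keys for audit: execution / signal / fusion / policy."""
--     execution: list[str] = []
--     signal_k: list[str] = []
--     fusion_k: list[str] = []
--     policy_k: list[str] = []
--     for k in keys:
--         if k in ("atr_stop_mult", "atr_target_mult"):
--             execution.append(k)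
--         elif k.startswith("fusion_"):
--             fusion_k.append(k)
--         elif k == "disabled_signal_modules":
--             policy_k.append(k)
--         elif k in BUNDLE_APPLY_WHITELIST:
--             signal_k.append(k)
--     return {
--         "execution_keys_applied": execution,
--         "signal_keys_applied": signal_k,
--         "fusion_keys_applied": fusion_k,
--         "policy_keys_applied": policy_k,
--     }
-- ===== SOURCE B (Python) =====
-- EXEC_KEYS = ("atr_stop_mult", "atr_target_mult")
--
-- SIGNAL_KEYS = frozenset(
--     {
--         "mean_reversion_fade_min_confidence",
--         "mean_reversion_fade_stretch_threshold",
--         "trend_continuation_min_confidence",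
--         "trend_continuation_min_regime_fit",
--         "pullback_continuation_min_confidence",
--         "pullback_continuation_volatility_threshold",
--         "breakout_expansion_min_confidence",
--     }
-- )
--
-- def categorize_applied_bundle_keys(keys: list[str]) -> dict[str, list[str]]:
--     """Split applied keys for audit: execution / signal / fusion / policy."""
--     return {
--         "execution_keys_applied": [k for k in keys if k in EXEC_KEYS],
--         "signal_keys_applied": [k for k in keys if k in SIGNAL_KEYS],
--         "fusion_keys_applied": [k for k in keys if k.startswith("fusion_")],
--         "policy_keys_applied": [k for k in keys if k == "disabled_signal_modules"],
--     }
-- ===== Notes on version B (the rewrite author's own statement) =====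
-- stated objective: simpler
-- what changed: Replaces the single-pass elif cascade with four independent filtered comprehensions, the signal filter using a precomputed SIGNAL_KEYS set of the seven threshold names so no precedence logic is needed at runtime.
import Mathlib
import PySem

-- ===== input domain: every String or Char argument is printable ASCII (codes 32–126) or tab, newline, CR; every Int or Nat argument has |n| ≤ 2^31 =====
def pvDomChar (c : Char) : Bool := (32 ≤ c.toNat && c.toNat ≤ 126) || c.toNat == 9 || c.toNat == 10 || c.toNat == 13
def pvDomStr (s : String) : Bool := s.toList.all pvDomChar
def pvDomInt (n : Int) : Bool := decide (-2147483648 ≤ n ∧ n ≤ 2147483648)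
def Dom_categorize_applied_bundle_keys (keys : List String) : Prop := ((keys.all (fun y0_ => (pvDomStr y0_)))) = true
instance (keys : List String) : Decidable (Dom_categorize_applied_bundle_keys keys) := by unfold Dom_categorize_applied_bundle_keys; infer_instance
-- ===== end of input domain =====

-- B replaces A's one-pass elif cascade by four independent filters (the signal filter uses a
-- precomputed set of the seven signal-threshold names); objective: simpler.

-- ===== PORT A =====
-- frozenset BUNDLE_APPLY_WHITELIST (PySem.Set: distinct elements; only membership is used)
def BUNDLE_APPLY_WHITELIST : List String :=
  [ "atr_stop_mult", "atr_target_mult",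
    "fusion_min_score", "fusion_max_conflict_score",
    "fusion_overlap_penalty_per_extra_signal",
    "mean_reversion_fade_min_confidence", "mean_reversion_fade_stretch_threshold",
    "trend_continuation_min_confidence", "trend_continuation_min_regime_fit",
    "pullback_continuation_min_confidence", "pullback_continuation_volatility_threshold",
    "breakout_expansion_min_confidence",
    "disabled_signal_modules" ]

-- one step of A's for-loop over (execution, signal_k, fusion_k, policy_k)
def pvStepA (st : List String × List String × List String × List String) (k : String) :
    List String × List String × List String × List String :=
  let (e, s, f, p) := st
  if k == "atr_stop_mult" || k == "atr_target_mult" then (e ++ [k], s, f, p)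
  else if PySem.Str.startswith k "fusion_" then (e, s, f ++ [k], p)
  else if k == "disabled_signal_modules" then (e, s, f, p ++ [k])
  else if BUNDLE_APPLY_WHITELIST.contains k then (e, s ++ [k], f, p)
  else (e, s, f, p)

def categorize_applied_bundle_keys (keys : List String) : List (String × List String) :=
  let r := keys.foldl pvStepA ([], [], [], [])
  [ ("execution_keys_applied", r.1),
    ("signal_keys_applied", r.2.1),
    ("fusion_keys_applied", r.2.2.1),
    ("policy_keys_applied", r.2.2.2) ]

-- ===== PORT B =====
def EXEC_KEYS : List String := ["atr_stop_mult", "atr_target_mult"]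

def SIGNAL_KEYS : List String :=
  [ "mean_reversion_fade_min_confidence", "mean_reversion_fade_stretch_threshold",
    "trend_continuation_min_confidence", "trend_continuation_min_regime_fit",
    "pullback_continuation_min_confidence", "pullback_continuation_volatility_threshold",
    "breakout_expansion_min_confidence" ]

def categorize_applied_bundle_keys_alt (keys : List String) : List (String × List String) :=
  [ ("execution_keys_applied", keys.filter (fun k => EXEC_KEYS.contains k)),
    ("signal_keys_applied", keys.filter (fun k => SIGNAL_KEYS.contains k)),
    ("fusion_keys_applied", keys.filter (fun k => PySem.Str.startswith k "fusion_")),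
    ("policy_keys_applied", keys.filter (fun k => k == "disabled_signal_modules")) ]

-- ===== PRECONDITION & SPEC =====
def Spec_categorize_applied_bundle_keys (keys : List String) (out : List (String × List String)) : Prop := out = categorize_applied_bundle_keys_alt keys
instance (keys : List String) (out : List (String × List String)) : Decidable (Spec_categorize_applied_bundle_keys keys out) := by unfold Spec_categorize_applied_bundle_keys; infer_instance

-- ===== CLAIM (what is proved, stated in full; the proofs are below) =====
def Claim_equal_categorize_applied_bundle_keys : Prop := ∀ (keys : List String), Dom_categorize_applied_bundle_keys keys → Spec_categorize_applied_bundle_keys keys (categorize_applied_bundle_keys keys)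

-- ===== LEMMAS AND PROOFS =====

-- A's branch predicates, with the elif precedence made explicit
def pvExecP (k : String) : Bool := k == "atr_stop_mult" || k == "atr_target_mult"
def pvFusP (k : String) : Bool := !pvExecP k && PySem.Str.startswith k "fusion_"
def pvPolP (k : String) : Bool :=
  !pvExecP k && !PySem.Str.startswith k "fusion_" && (k == "disabled_signal_modules")
def pvSigP (k : String) : Bool :=
  !pvExecP k && !PySem.Str.startswith k "fusion_" && !(k == "disabled_signal_modules") &&
    BUNDLE_APPLY_WHITELIST.contains k

-- A's loop computes the four filters (appended to the running accumulators)
theorem pvFoldA_eq (keys : List String) :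
    ∀ (e s f p : List String),
      keys.foldl pvStepA (e, s, f, p) =
        (e ++ keys.filter pvExecP, s ++ keys.filter pvSigP,
         f ++ keys.filter pvFusP, p ++ keys.filter pvPolP) := by
  induction keys with
  | nil => simp
  | cons k ks ih =>
    intro e s f p
    simp only [List.foldl_cons, pvStepA, List.filter_cons]
    by_cases h1 : (k = "atr_stop_mult" ∨ k = "atr_target_mult")
    · rcases h1 with rfl | rfl <;>
        simp [pvExecP, pvFusP, pvPolP, pvSigP, PySem.Str.startswith, ih]
    · push Not at h1
      by_cases h2 : PySem.Chars.startswith k.toList ['f','u','s','i','o','n','_'] = true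
      · simp [pvExecP, pvFusP, pvPolP, pvSigP, PySem.Str.startswith, h1.1, h1.2, h2, ih]
      · by_cases h3 : k = "disabled_signal_modules"
        · subst h3
          simp [pvExecP, pvFusP, pvPolP, pvSigP, PySem.Str.startswith, ih,
            show PySem.Chars.startswith
              ['d','i','s','a','b','l','e','d','_','s','i','g','n','a','l','_','m','o','d','u','l','e','s']
              ['f','u','s','i','o','n','_'] = false from by decide]
        · by_cases h4 : k ∈ BUNDLE_APPLY_WHITELIST
          · simp [pvExecP, pvFusP, pvPolP, pvSigP, PySem.Str.startswith, h1.1, h1.2, h2, h3, h4, ih]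
          · simp [pvExecP, pvFusP, pvPolP, pvSigP, PySem.Str.startswith, h1.1, h1.2, h2, h3, h4, ih]

-- execution keys never start with "fusion_" and are not the policy key, so A's guards drop
theorem pvFusP_eq (k : String) : pvFusP k = PySem.Str.startswith k "fusion_" := by
  by_cases h : pvExecP k = true
  · rcases (by simpa [pvExecP] using h : k = "atr_stop_mult" ∨ k = "atr_target_mult") with
      rfl | rfl <;> decide
  · simp [pvFusP, h]

theorem pvPolP_eq (k : String) : pvPolP k = (k == "disabled_signal_modules") := by
  by_cases h : k = "disabled_signal_modules"
  · subst h; decide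
  · simp [pvPolP, h]

theorem pvExecP_eq (k : String) : pvExecP k = EXEC_KEYS.contains k := by
  by_cases h1 : k = "atr_stop_mult" <;> by_cases h2 : k = "atr_target_mult" <;>
    simp [pvExecP, EXEC_KEYS, h1, h2]

-- the seven SIGNAL_KEYS are exactly the whitelist members that survive A's three guards
theorem pvSigP_eq (k : String) : pvSigP k = SIGNAL_KEYS.contains k := by
  by_cases hw : k ∈ BUNDLE_APPLY_WHITELIST
  · fin_cases hw <;> decide
  · have hs : k ∉ SIGNAL_KEYS := fun hm => hw (by fin_cases hm <;> decide)
    simp [pvSigP, hw, hs]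

-- ===== VERDICT (by name: the statement is the Claim_ definition above) =====
theorem categorize_applied_bundle_keys_spec : Claim_equal_categorize_applied_bundle_keys := by
  intro keys _
  unfold Spec_categorize_applied_bundle_keys categorize_applied_bundle_keys categorize_applied_bundle_keys_alt
  rw [pvFoldA_eq keys [] [] [] []]
  simp only [List.nil_append]
  rw [List.filter_congr (fun k _ => pvExecP_eq k),
      List.filter_congr (fun k _ => pvSigP_eq k),
      List.filter_congr (fun k _ => pvFusP_eq k),
      List.filter_congr (fun k _ => pvPolP_eq k)]
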